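-- pv_equiv track=rewrite | github.com/fshahinfar1/PanzerGame | server.py | find_semi_colon
-- ===== SOURCE A (Python) =====
-- def find_semi_colon(string, index):
--     count = -1
--     last_comma = 1
--     for i in range(len(string)):
--         if string[i] == ';' or string[i] == '}':
--             count += 1
--             if count == index:
--                 return last_comma, i
--             last_comma = i + 1  # it is not simi colon's index. it is next character's index.
--     # if not found
--     return -1, -1
-- ===== SOURCE B (Python) =====
-- def find_semi_colon(string, index):
--     pos = [i for i, c in enumerate(string) if c == ';' or c == '}']
--     if index < 0 or index >= len(pos):
--         return -1, -1
--     end = pos[index]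
--     start = 1 if index == 0 else pos[index - 1] + 1
--     return start, end
-- ===== Notes on version B (the rewrite author's own statement) =====
-- stated objective: alternative
-- what changed: Replaces the single-pass early-return scan carrying count/last_comma state with building the list of all delimiter positions once and answering by direct indexing (pos[index], pos[index-1]+1) with an explicit bounds guard.
import Mathlib
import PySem

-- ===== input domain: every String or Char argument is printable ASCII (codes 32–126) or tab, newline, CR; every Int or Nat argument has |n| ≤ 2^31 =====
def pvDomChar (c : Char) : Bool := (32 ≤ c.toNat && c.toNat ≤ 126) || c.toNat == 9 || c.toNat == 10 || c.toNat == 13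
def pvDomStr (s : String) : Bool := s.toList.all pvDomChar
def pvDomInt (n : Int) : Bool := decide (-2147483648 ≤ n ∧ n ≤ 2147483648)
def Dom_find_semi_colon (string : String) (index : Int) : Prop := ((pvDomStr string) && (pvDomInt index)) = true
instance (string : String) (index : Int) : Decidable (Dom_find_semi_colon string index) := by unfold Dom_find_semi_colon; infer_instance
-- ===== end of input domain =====

-- B replaces A's single-pass early-return scan (count/last_comma state) by building the
-- list of all delimiter positions once and answering by direct indexing (objective: alternative).

-- ===== PORT A =====
-- the for-loop with early return, carried as structural recursion over the characters;
-- i is the running index, count and last_comma the loop state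
def findSemiAux : List Char → Int → Int → Int → Int → Int × Int
  | [], _, _, _, _ => (-1, -1)
  | c :: rest, i, count, last_comma, index =>
    if c = ';' ∨ c = '}' then
      if count + 1 = index then (last_comma, i)
      else findSemiAux rest (i + 1) (count + 1) (i + 1) index
    else findSemiAux rest (i + 1) count last_comma index

def find_semi_colon (string : String) (index : Int) : Int × Int :=
  findSemiAux string.toList 0 (-1) 1 index

-- ===== PORT B =====
def find_semi_colon_alt (string : String) (index : Int) : Int × Int :=
  -- pos = [i for i, c in enumerate(string) if c == ';' or c == '}']
  let pos : List Int := (PySem.List.enumerate string.toList 0).filterMap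
    (fun p => if p.2 = ';' ∨ p.2 = '}' then some p.1 else none)
  if index < 0 ∨ (pos.length : Int) ≤ index then (-1, -1)
  else
    let e := (PySem.List.pyGet? pos index).getD 0
    let s := if index = 0 then 1 else (PySem.List.pyGet? pos (index - 1)).getD 0 + 1
    (s, e)

-- ===== PRECONDITION & SPEC =====
def Spec_find_semi_colon (string : String) (index : Int) (out : Int × Int) : Prop := out = find_semi_colon_alt string index
instance (string : String) (index : Int) (out : Int × Int) : Decidable (Spec_find_semi_colon string index out) := by unfold Spec_find_semi_colon; infer_instance

-- ===== CLAIM (what is proved, stated in full; the proofs are below) =====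
def Claim_equal_find_semi_colon : Prop := ∀ (string : String) (index : Int), Dom_find_semi_colon string index → Spec_find_semi_colon string index (find_semi_colon string index)

-- ===== LEMMAS AND PROOFS =====

-- positions (offset by i) of the delimiters in cs
def posFrom : List Char → Int → List Int
  | [], _ => []
  | c :: rest, i =>
    if c = ';' ∨ c = '}' then i :: posFrom rest (i + 1) else posFrom rest (i + 1)

-- the answer as a function of the position table, the pending last_comma and k = index - count - 1
def pickSpec (P : List Int) (last k : Int) : Int × Int :=
  if 0 ≤ k ∧ k < (P.length : Int) then
    ((if k = 0 then last else (PySem.List.pyGet? P (k - 1)).getD 0 + 1),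
     (PySem.List.pyGet? P k).getD 0)
  else (-1, -1)

lemma pyGet?_cons_pos {α : Type} (x : α) (P : List α) (k : Int) (hk : 1 ≤ k) :
    PySem.List.pyGet? (x :: P) k = PySem.List.pyGet? P (k - 1) := by
  rw [PySem.List.pyGet?_of_nonneg _ (by omega : (0:Int) ≤ k),
    PySem.List.pyGet?_of_nonneg _ (by omega : (0:Int) ≤ k - 1)]
  have h : k.toNat = (k - 1).toNat + 1 := by omega
  rw [h, List.getElem?_cons_succ]

lemma pickSpec_cons_ne (x : Int) (P : List Int) (last k : Int) (hk : k ≠ 0) :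
    pickSpec (x :: P) last k = pickSpec P (x + 1) (k - 1) := by
  unfold pickSpec
  by_cases h0 : 1 ≤ k
  · by_cases hlen : k < (P.length : Int) + 1
    · rw [if_pos (show 0 ≤ k ∧ k < (((x :: P).length : Int)) by simp; omega),
        if_neg hk,
        if_pos (show 0 ≤ k - 1 ∧ k - 1 < ((P.length : Int)) from ⟨by omega, by omega⟩),
        pyGet?_cons_pos _ _ _ h0]
      by_cases h1 : k = 1
      · subst h1
        norm_num [PySem.List.pyGet?_zero_cons]
      · rw [if_neg (show ¬(k - 1 = 0) by omega), pyGet?_cons_pos _ _ _ (by omega)]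
    · rw [if_neg (by simp; omega), if_neg (by simp; omega)]
  · rw [if_neg (by omega), if_neg (by omega)]

lemma findSemiAux_eq (cs : List Char) :
    ∀ (i count last index : Int),
      findSemiAux cs i count last index = pickSpec (posFrom cs i) last (index - count - 1) := by
  induction cs with
  | nil => intro i count last index; simp [findSemiAux, posFrom, pickSpec]
  | cons c rest ih =>
    intro i count last index
    by_cases hd : c = ';' ∨ c = '}'
    · rw [findSemiAux, if_pos hd, posFrom, if_pos hd]
      by_cases hk : count + 1 = index
      · rw [if_pos hk]
        have h0 : index - count - 1 = 0 := by omega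
        rw [h0]
        unfold pickSpec
        rw [if_pos (by simp)]
        simp
      · rw [if_neg hk, ih, pickSpec_cons_ne _ _ _ _ (by omega)]
        have h2 : index - (count + 1) - 1 = index - count - 1 - 1 := by omega
        rw [h2]
    · rw [findSemiAux, if_neg hd, posFrom, if_neg hd, ih]

lemma posList_eq (cs : List Char) :
    ∀ (i : Int),
      (PySem.List.enumerate cs i).filterMap
        (fun p => if p.2 = ';' ∨ p.2 = '}' then some p.1 else none) = posFrom cs i := by
  induction cs with
  | nil => intro i; simp [PySem.List.enumerate_nil, posFrom]
  | cons c rest ih =>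
    intro i
    rw [PySem.List.enumerate_cons, List.filterMap_cons, posFrom]
    by_cases hd : c = ';' ∨ c = '}'
    · rw [if_pos hd, if_pos hd, ih]
    · rw [if_neg hd, if_neg hd, ih]

-- ===== VERDICT (by name: the statement is the Claim_ definition above) =====
theorem find_semi_colon_spec : Claim_equal_find_semi_colon := by
  intro string index _
  unfold Spec_find_semi_colon find_semi_colon find_semi_colon_alt
  rw [findSemiAux_eq, posList_eq]
  have h0 : index - (-1) - 1 = index := by omega
  rw [h0]
  unfold pickSpec
  by_cases h : index < 0 ∨ ((posFrom string.toList 0).length : Int) ≤ index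
  · rw [if_pos h, if_neg (by omega)]
  · rw [if_neg h, if_pos (by omega)]
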